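-- pv_equiv track=rewrite | github.com/longphamduc-vn/EMS-Auto-Endpoint2 | ems_workflow/utils.py | _find_top_level_ternary
-- ===== SOURCE A (Python) =====
-- from typing import Any, Dict, List, Optional, Tuple
--
-- def _find_top_level_ternary(expression: str) -> int:
--     depth = 0
--     quote: Optional[str] = None
--     escaped = False
--
--     for index, char in enumerate(expression):
--         if quote:
--             if escaped:
--                 escaped = False
--             elif char == "\\":
--                 escaped = True
--             elif char == quote:
--                 quote = None
--             continue
--
--         if char in ("'", '"'):
--             quote = char
--         elif char in "([{":
--             depth += 1
--         elif char in ")]}":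
--             depth = max(0, depth - 1)
--         elif char == "?" and depth == 0:
--             return index
--
--     return -1
-- ===== SOURCE B (Python) =====
-- def _find_top_level_ternary(expression: str) -> int:
--     n = len(expression)
--
--     # Stage 1: mask of positions belonging to string literals (delimiters included).
--     in_string = [False] * n
--     i = 0
--     while i < n:
--         ch = expression[i]
--         if ch in "'\"":
--             in_string[i] = True
--             i += 1
--             while i < n:
--                 in_string[i] = True
--                 if expression[i] == "\\":
--                     if i + 1 < n:
--                         in_string[i + 1] = True
--                     i += 2
--                 elif expression[i] == ch:
--                     i += 1
--                     break
--                 else: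
--                     i += 1
--         else:
--             i += 1
--
--     # Stage 2: clamped bracket depth *before* each position, ignoring masked chars.
--     depth_at = [0] * n
--     d = 0
--     for i in range(n):
--         depth_at[i] = d
--         if not in_string[i]:
--             if expression[i] in "([{":
--                 d += 1
--             elif expression[i] in ")]}":
--                 d = max(0, d - 1)
--
--     # Stage 3: first unmasked '?' at depth 0.
--     for i in range(n):
--         if not in_string[i] and depth_at[i] == 0 and expression[i] == "?":
--             return i
--     return -1
-- ===== Notes on version B (the rewrite author's own statement) =====
-- stated objective: alternative
-- what changed: Replaces A's single stateful pass (persistent quote/escape flags plus depth) by three staged passes building intermediate arrays: a string-literal mask, then a clamped-depth-before-index array over unmasked chars, then a search for the first unmasked question mark at depth 0.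
import Mathlib
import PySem

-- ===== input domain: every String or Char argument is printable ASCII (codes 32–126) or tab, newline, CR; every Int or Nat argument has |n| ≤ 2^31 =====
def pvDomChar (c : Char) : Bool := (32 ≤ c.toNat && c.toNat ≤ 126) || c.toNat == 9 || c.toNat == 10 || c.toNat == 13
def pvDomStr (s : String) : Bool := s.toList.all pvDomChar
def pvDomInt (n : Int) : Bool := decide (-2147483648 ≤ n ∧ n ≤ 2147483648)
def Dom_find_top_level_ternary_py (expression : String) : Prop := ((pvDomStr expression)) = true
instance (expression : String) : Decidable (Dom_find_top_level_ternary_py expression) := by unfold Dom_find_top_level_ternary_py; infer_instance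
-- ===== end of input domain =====

-- B replaces A's single stateful pass by three staged passes with intermediate arrays:
-- a string-literal mask, a clamped-depth-before-index array, then a search
-- (objective: alternative decomposition, same cost).

-- ===== PORT A =====
-- state machine exactly as A's for-loop: (index, depth, quote, escaped)
def goA : List Char → Int → Int → Option Char → Bool → Int
  | [], _, _, _, _ => -1
  | c :: rest, i, depth, quote, escaped =>
    match quote with
    | some q =>
      if escaped then goA rest (i + 1) depth (some q) false
      else if c = '\\' then goA rest (i + 1) depth (some q) true
      else if c = q then goA rest (i + 1) depth none escaped
      else goA rest (i + 1) depth (some q) escaped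
    | none =>
      if c = '\'' ∨ c = '"' then goA rest (i + 1) depth (some c) escaped
      else if c = '(' ∨ c = '[' ∨ c = '{' then goA rest (i + 1) (depth + 1) none escaped
      else if c = ')' ∨ c = ']' ∨ c = '}' then goA rest (i + 1) (max 0 (depth - 1)) none escaped
      else if c = '?' ∧ depth = 0 then i
      else goA rest (i + 1) depth none escaped

def find_top_level_ternary_py (expression : String) : Int :=
  goA expression.toList 0 0 none false

-- ===== PORT B =====
-- Stage 1: the in_string mask (True for every char belonging to a string literal,
-- delimiters and escaped chars included); maskLit is the inner while-loop of Source B.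
mutual
def maskCode : List Char → List Bool
  | [] => []
  | c :: rest =>
    if c = '\'' ∨ c = '"' then true :: maskLit c rest
    else false :: maskCode rest
termination_by l => l.length
def maskLit (q : Char) : List Char → List Bool
  | [] => []
  | c :: rest =>
    if c = '\\' then
      match rest with
      | [] => [true]
      | _ :: r => true :: true :: maskLit q r
    else if c = q then true :: maskCode rest
    else true :: maskLit q rest
termination_by l => l.length
end

-- Stage 2: clamped bracket depth before each position, ignoring masked chars.
def depths : List (Char × Bool) → Int → List Int
  | [], _ => []
  | (c, m) :: rest, d =>
    d :: depths rest
      (if m then d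
       else if c = '(' ∨ c = '[' ∨ c = '{' then d + 1
       else if c = ')' ∨ c = ']' ∨ c = '}' then max 0 (d - 1)
       else d)

-- Stage 3: first unmasked '?' at depth 0.
def search : List (Char × Bool × Int) → Int → Int
  | [], _ => -1
  | (c, m, d) :: rest, i =>
    if m = false ∧ d = 0 ∧ c = '?' then i else search rest (i + 1)

def find_top_level_ternary_py_alt (expression : String) : Int :=
  let l := expression.toList
  let ms := maskCode l
  let ds := depths (l.zip ms) 0
  search (l.zip (ms.zip ds)) 0

-- ===== PRECONDITION & SPEC =====
def Spec_find_top_level_ternary_py (expression : String) (out : Int) : Prop := out = find_top_level_ternary_py_alt expression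
instance (expression : String) (out : Int) : Decidable (Spec_find_top_level_ternary_py expression out) := by unfold Spec_find_top_level_ternary_py; infer_instance

-- ===== CLAIM (what is proved, stated in full; the proofs are below) =====
def Claim_equal_find_top_level_ternary_py : Prop := ∀ (expression : String), Dom_find_top_level_ternary_py expression → Spec_find_top_level_ternary_py expression (find_top_level_ternary_py expression)

-- ===== LEMMAS AND PROOFS =====

-- simultaneous strong induction: code-state and literal-state equivalences
theorem goA_eq_staged :
    ∀ (n : Nat) (l : List Char), l.length ≤ n →
      (∀ i depth, goA l i depth none false =
        search (l.zip ((maskCode l).zip (depths (l.zip (maskCode l)) depth))) i) ∧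
      (∀ i depth q, goA l i depth (some q) false =
        search (l.zip ((maskLit q l).zip (depths (l.zip (maskLit q l)) depth))) i) := by
  intro n
  induction n with
  | zero =>
    intro l hl
    have : l = [] := List.eq_nil_of_length_eq_zero (Nat.le_zero.mp hl)
    subst this
    refine ⟨fun i depth => ?_, fun i depth q => ?_⟩ <;>
      simp [goA, maskCode, maskLit, depths, search]
  | succ n ih =>
    intro l hl
    match l with
    | [] =>
      refine ⟨fun i depth => ?_, fun i depth q => ?_⟩ <;>
        simp [goA, maskCode, maskLit, depths, search]
    | c :: rest =>
      have hr : rest.length ≤ n := by simp at hl; omega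
      constructor
      · intro i depth
        by_cases hq : c = '\'' ∨ c = '"'
        · have hA : goA (c :: rest) i depth none false
              = goA rest (i + 1) depth (some c) false := by simp [goA, hq]
          have hm : maskCode (c :: rest) = true :: maskLit c rest := by
            rw [maskCode]; simp [hq]
          have hq' : ¬ (c = '?') := by rcases hq with h | h <;> simp [h]
          rw [hA, (ih rest hr).2 (i + 1) depth c, hm]
          simp [depths, search, hq']
        · have hm : maskCode (c :: rest) = false :: maskCode rest := by
            rw [maskCode]; simp [hq]
          rw [hm]
          by_cases h1 : c = '(' ∨ c = '[' ∨ c = '{'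
          · have hc : ¬ (c = '?') := by rcases h1 with h | h | h <;> simp [h]
            simp only [goA, hq, h1, if_true, if_false, List.zip_cons_cons, depths, search]
            simp only [hc, and_false, if_false]
            simp
            exact (ih rest hr).1 (i + 1) (depth + 1)
          · by_cases h2 : c = ')' ∨ c = ']' ∨ c = '}'
            · have hc : ¬ (c = '?') := by rcases h2 with h | h | h <;> simp [h]
              simp only [goA, hq, h1, h2, if_true, if_false, List.zip_cons_cons, depths, search]
              simp [hc]
              exact (ih rest hr).1 (i + 1) (max 0 (depth - 1))
            · by_cases hc : c = '?'
              · by_cases hd : depth = 0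
                · simp [goA, hc, hd, depths, search]
                · simp only [goA, hq, h1, h2, if_false, List.zip_cons_cons, depths, search]
                  simp [hc, hd]
                  exact (ih rest hr).1 (i + 1) depth
              · simp only [goA, hq, h1, h2, if_false, List.zip_cons_cons, depths, search]
                simp [hc]
                exact (ih rest hr).1 (i + 1) depth
      · intro i depth q
        by_cases hb : c = '\\'
        · subst hb
          match rest with
          | [] =>
            simp [goA, maskLit, depths, search]
          | d :: rest' =>
            have hr' : rest'.length ≤ n := by simp at hl; omega
            have hA : goA ('\\' :: d :: rest') i depth (some q) false
                = goA rest' (i + 1 + 1) depth (some q) false := by simp [goA]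
            have hm : maskLit q ('\\' :: d :: rest') = true :: true :: maskLit q rest' := by
              rw [maskLit]; simp
            rw [hA, (ih rest' hr').2 (i + 1 + 1) depth q, hm]
            simp [depths, search]
        · by_cases hc : c = q
          · subst hc
            have hA : goA (c :: rest) i depth (some c) false
                = goA rest (i + 1) depth none false := by simp [goA, hb]
            have hm : maskLit c (c :: rest) = true :: maskCode rest := by
              rw [maskLit.eq_def]; simp [hb]
            rw [hA, (ih rest hr).1 (i + 1) depth, hm]
            simp [depths, search]
          · have hA : goA (c :: rest) i depth (some q) false
                = goA rest (i + 1) depth (some q) false := by simp [goA, hb, hc]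
            have hm : maskLit q (c :: rest) = true :: maskLit q rest := by
              rw [maskLit.eq_def]; simp [hb, hc]
            rw [hA, (ih rest hr).2 (i + 1) depth q, hm]
            simp [depths, search]

-- ===== VERDICT (by name: the statement is the Claim_ definition above) =====
theorem find_top_level_ternary_py_spec : Claim_equal_find_top_level_ternary_py := by
  intro expression _
  unfold Spec_find_top_level_ternary_py find_top_level_ternary_py find_top_level_ternary_py_alt
  exact (goA_eq_staged expression.toList.length expression.toList (le_refl _)).1 0 0
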